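-- pv_equiv track=rewrite | github.com/JeanPhilipLalumiere/MCGT | tools/fix_cli_backfill_indent.py | strip_old_backfills
-- ===== SOURCE A (Python) =====
-- TAG_START = "# --- cli post-parse backfill (auto v2) ---"
--
-- TAG_END   = "# --- end cli post-parse backfill (auto v2) ---"
--
-- def strip_old_backfills(lines):
--     out, i, changed = [], 0, False
--     while i < len(lines):
--         if lines[i].lstrip().startswith(TAG_START):
--             j = i + 1
--             while j < len(lines) and not lines[j].lstrip().startswith(TAG_END):
--                 j += 1
--             if j < len(lines):
--                 j += 1  # inclure la ligne TAG_END
--                 changed = True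
--                 i = j
--                 continue
--         out.append(lines[i]); i += 1
--     return out, changed
-- ===== SOURCE B (Python) =====
-- TAG_START = "# --- cli post-parse backfill (auto v2) ---"
--
-- TAG_END   = "# --- end cli post-parse backfill (auto v2) ---"
--
-- def strip_old_backfills(lines):
--     out, pending, in_block, changed = [], [], False, False
--     for line in lines:
--         if in_block:
--             if line.lstrip().startswith(TAG_END):
--                 pending = []
--                 in_block = False
--                 changed = True
--             else:
--                 pending.append(line)
--         elif line.lstrip().startswith(TAG_START):
--             in_block = True
--             pending = [line]
--         else:
--             out.append(line)
--     if in_block: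
--         out.extend(pending)
--     return out, changed
-- ===== Notes on version B (the rewrite author's own statement) =====
-- stated objective: faster
-- what changed: Replaces A's index-based outer loop with a lookahead inner scan for TAG_END by a single forward pass state machine (in_block flag + pending buffer flushed at EOF for unterminated blocks).
import Mathlib
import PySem

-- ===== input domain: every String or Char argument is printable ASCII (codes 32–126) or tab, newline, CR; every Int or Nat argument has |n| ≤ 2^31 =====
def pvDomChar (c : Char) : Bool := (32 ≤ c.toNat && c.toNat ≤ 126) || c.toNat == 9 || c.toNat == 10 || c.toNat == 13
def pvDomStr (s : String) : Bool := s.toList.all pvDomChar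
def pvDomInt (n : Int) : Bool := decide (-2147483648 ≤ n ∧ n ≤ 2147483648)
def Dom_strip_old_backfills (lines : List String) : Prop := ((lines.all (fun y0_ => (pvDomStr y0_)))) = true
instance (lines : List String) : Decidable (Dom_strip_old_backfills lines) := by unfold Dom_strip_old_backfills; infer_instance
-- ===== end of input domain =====

-- B replaces A's index loop with lookahead scan by a single-pass state machine with a pending buffer; return values proved equal.

-- ===== PORT A =====
def pvTagStart : String := "# --- cli post-parse backfill (auto v2) ---"
def pvTagEnd : String := "# --- end cli post-parse backfill (auto v2) ---"

-- lines[i].lstrip().startswith(TAG)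
def pvIsStart (s : String) : Bool := PySem.Str.startswith (PySem.Str.lstrip s) pvTagStart
def pvIsEnd (s : String) : Bool := PySem.Str.startswith (PySem.Str.lstrip s) pvTagEnd

-- inner while: j advances until a TAG_END line or len(lines)
def pvFindEnd (lines : List String) (j : Nat) : Nat :=
  if h : j < lines.length then
    if pvIsEnd lines[j] then j else pvFindEnd lines (j + 1)
  else j
  termination_by lines.length - j

theorem pvFindEnd_ge (lines : List String) (j : Nat) : j ≤ pvFindEnd lines j := by
  unfold pvFindEnd
  split
  · split
    · exact le_refl j
    · exact le_trans (Nat.le_succ j) (pvFindEnd_ge lines (j + 1))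
  · exact le_refl j
  termination_by lines.length - j

-- outer while over index i with accumulator (out, changed)
def pvALoop (lines : List String) (out : List String) (i : Nat) (changed : Bool) :
    List String × Bool :=
  if h : i < lines.length then
    if pvIsStart lines[i] then
      let j := pvFindEnd lines (i + 1)
      if j < lines.length then
        pvALoop lines out (j + 1) true
      else
        pvALoop lines (out ++ [lines[i]]) (i + 1) changed
    else
      pvALoop lines (out ++ [lines[i]]) (i + 1) changed
  else (out, changed)
  termination_by lines.length - i
  decreasing_by
  · have := pvFindEnd_ge lines (i + 1); omega
  · omega
  · omega

def strip_old_backfills (lines : List String) : List String × Bool :=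
  pvALoop lines [] 0 false

-- ===== PORT B =====
-- state: (out, pending, in_block, changed)
def pvBStep (st : List String × List String × Bool × Bool) (line : String) :
    List String × List String × Bool × Bool :=
  let (out, pending, in_block, changed) := st
  if in_block then
    if PySem.Str.startswith (PySem.Str.lstrip line) pvTagEnd then
      (out, [], false, true)
    else
      (out, pending ++ [line], in_block, changed)
  else if PySem.Str.startswith (PySem.Str.lstrip line) pvTagStart then
    (out, [line], true, changed)
  else
    (out ++ [line], pending, in_block, changed)

def pvBFinish (st : List String × List String × Bool × Bool) : List String × Bool :=
  let (out, pending, in_block, changed) := st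
  if in_block then (out ++ pending, changed) else (out, changed)

def strip_old_backfills_alt (lines : List String) : List String × Bool :=
  pvBFinish (lines.foldl pvBStep ([], [], false, false))

-- ===== PRECONDITION & SPEC =====
def Spec_strip_old_backfills (lines : List String) (out : List String × Bool) : Prop := out = strip_old_backfills_alt lines
instance (lines : List String) (out : List String × Bool) : Decidable (Spec_strip_old_backfills lines out) := by unfold Spec_strip_old_backfills; infer_instance

-- ===== CLAIM (what is proved, stated in full; the proofs are below) =====
def Claim_equal_strip_old_backfills : Prop := ∀ (lines : List String), Dom_strip_old_backfills lines → Spec_strip_old_backfills lines (strip_old_backfills lines)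

-- ===== LEMMAS AND PROOFS =====

theorem pvFindEnd_le (lines : List String) (j : Nat) (h : j ≤ lines.length) :
    pvFindEnd lines j ≤ lines.length := by
  unfold pvFindEnd
  split
  · split
    · omega
    · exact pvFindEnd_le lines (j + 1) (by omega)
  · omega
  termination_by lines.length - j

-- while in_block with no TAG_END ahead, everything is buffered
theorem pvB_inblock_noend (lines : List String) (s : Nat) (hs : s ≤ lines.length)
    (hnoend : pvFindEnd lines s = lines.length) (out p : List String) (c : Bool) :
    (lines.drop s).foldl pvBStep (out, p, true, c) = (out, p ++ lines.drop s, true, c) := by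
  by_cases h : s < lines.length
  · have hdrop := List.drop_eq_getElem_cons h
    have hne : pvIsEnd lines[s] = false := by
      by_contra hend
      have : pvFindEnd lines s = s := by
        unfold pvFindEnd; simp [h, Bool.of_not_eq_false hend]
      omega
    have hrec : pvFindEnd lines (s + 1) = lines.length := by
      have : pvFindEnd lines s = pvFindEnd lines (s + 1) := by
        conv_lhs => rw [pvFindEnd]
        simp [h, show pvIsEnd lines[s] ≠ true by simp [hne]]
      omega
    rw [hdrop]
    simp only [List.foldl_cons]
    have hstep : pvBStep (out, p, true, c) lines[s] = (out, p ++ [lines[s]], true, c) := by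
      simp [pvBStep, pvIsEnd] at hne ⊢; simp [hne]
    rw [hstep, pvB_inblock_noend lines (s + 1) (by omega) hrec out (p ++ [lines[s]]) c]
    simp
  · have : lines.drop s = [] := List.drop_eq_nil_of_le (by omega)
    simp [this]
  termination_by lines.length - s

-- while in_block, reaching the first TAG_END resets the state
theorem pvB_inblock_end (lines : List String) (s : Nat)
    (hend : pvFindEnd lines s < lines.length) (out p : List String) (c : Bool) :
    (lines.drop s).foldl pvBStep (out, p, true, c) =
      (lines.drop (pvFindEnd lines s + 1)).foldl pvBStep (out, [], false, true) := by
  have hs : s < lines.length := lt_of_le_of_lt (pvFindEnd_ge lines s) hend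
  have hdrop := List.drop_eq_getElem_cons hs
  by_cases he : pvIsEnd lines[s] = true
  · have hfe : pvFindEnd lines s = s := by unfold pvFindEnd; simp [hs, he]
    rw [hdrop]
    simp only [List.foldl_cons]
    have hstep : pvBStep (out, p, true, c) lines[s] = (out, [], false, true) := by
      simp [pvIsEnd] at he; simp [pvBStep, he]
    rw [hstep, hfe]
  · have hfe : pvFindEnd lines s = pvFindEnd lines (s + 1) := by
      conv_lhs => rw [pvFindEnd]
      simp [hs, he]
    rw [hdrop]
    simp only [List.foldl_cons]
    have hstep : pvBStep (out, p, true, c) lines[s] = (out, p ++ [lines[s]], true, c) := by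
      simp [pvIsEnd] at he; simp [pvBStep, he]
    rw [hstep, pvB_inblock_end lines (s + 1) (hfe ▸ hend) out (p ++ [lines[s]]) c, hfe]
  termination_by lines.length - s

-- with no TAG_END ahead, B emits every remaining line unchanged
theorem pvB_nonblock_noend (lines : List String) (s : Nat) (hs : s ≤ lines.length)
    (hnoend : pvFindEnd lines s = lines.length) (out : List String) (c : Bool) :
    pvBFinish ((lines.drop s).foldl pvBStep (out, [], false, c)) = (out ++ lines.drop s, c) := by
  by_cases h : s < lines.length
  · have hdrop := List.drop_eq_getElem_cons h
    have hne : pvIsEnd lines[s] = false := by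
      by_contra hend
      have : pvFindEnd lines s = s := by
        unfold pvFindEnd; simp [h, Bool.of_not_eq_false hend]
      omega
    have hrec : pvFindEnd lines (s + 1) = lines.length := by
      have : pvFindEnd lines s = pvFindEnd lines (s + 1) := by
        conv_lhs => rw [pvFindEnd]
        simp [h, show pvIsEnd lines[s] ≠ true by simp [hne]]
      omega
    rw [hdrop]
    simp only [List.foldl_cons]
    by_cases hst : pvIsStart lines[s] = true
    · have hstep : pvBStep (out, [], false, c) lines[s] = (out, [lines[s]], true, c) := by
        simp [pvIsStart] at hst; simp [pvBStep, hst]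
      rw [hstep, pvB_inblock_noend lines (s + 1) (by omega) hrec out [lines[s]] c]
      simp [pvBFinish]
    · have hstep : pvBStep (out, [], false, c) lines[s] = (out ++ [lines[s]], [], false, c) := by
        simp [pvIsStart] at hst; simp [pvBStep, hst]
      rw [hstep, pvB_nonblock_noend lines (s + 1) (by omega) hrec (out ++ [lines[s]]) c]
      simp
  · have : lines.drop s = [] := List.drop_eq_nil_of_le (by omega)
    simp [this, pvBFinish]
  termination_by lines.length - s

-- main invariant: A's loop from index i = B's machine run over the remaining suffix
theorem pvMain (lines : List String) (i : Nat) (out : List String) (c : Bool) :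
    pvALoop lines out i c = pvBFinish ((lines.drop i).foldl pvBStep (out, [], false, c)) := by
  by_cases h : i < lines.length
  · have hdrop := List.drop_eq_getElem_cons h
    by_cases hst : pvIsStart lines[i] = true
    · by_cases hend : pvFindEnd lines (i + 1) < lines.length
      · -- closed block: A jumps past TAG_END with changed := true
        rw [show pvALoop lines out i c = pvALoop lines out (pvFindEnd lines (i + 1) + 1) true by
              conv_lhs => rw [pvALoop]
              simp [h, hst, hend]]
        rw [pvMain lines (pvFindEnd lines (i + 1) + 1) out true, hdrop]
        simp only [List.foldl_cons]
        have hstep : pvBStep (out, [], false, c) lines[i] = (out, [lines[i]], true, c) := by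
          simp [pvIsStart] at hst; simp [pvBStep, hst]
        rw [hstep, pvB_inblock_end lines (i + 1) hend out [lines[i]] c]
      · -- unterminated block: every remaining line is kept
        have hfe : pvFindEnd lines (i + 1) = lines.length := by
          have := pvFindEnd_le lines (i + 1) (by omega); omega
        rw [show pvALoop lines out i c = pvALoop lines (out ++ [lines[i]]) (i + 1) c by
              conv_lhs => rw [pvALoop]
              simp [h, hst, hend]]
        rw [pvMain lines (i + 1) (out ++ [lines[i]]) c, hdrop]
        simp only [List.foldl_cons]
        have hstep : pvBStep (out, [], false, c) lines[i] = (out, [lines[i]], true, c) := by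
          simp [pvIsStart] at hst; simp [pvBStep, hst]
        rw [hstep, pvB_inblock_noend lines (i + 1) (by omega) hfe out [lines[i]] c,
            pvB_nonblock_noend lines (i + 1) (by omega) hfe (out ++ [lines[i]]) c]
        simp [pvBFinish]
    · rw [show pvALoop lines out i c = pvALoop lines (out ++ [lines[i]]) (i + 1) c by
            conv_lhs => rw [pvALoop]
            simp [h, hst]]
      rw [pvMain lines (i + 1) (out ++ [lines[i]]) c, hdrop]
      simp only [List.foldl_cons]
      have hstep : pvBStep (out, [], false, c) lines[i] = (out ++ [lines[i]], [], false, c) := by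
        simp [pvIsStart] at hst; simp [pvBStep, hst]
      rw [hstep]
  · have : lines.drop i = [] := List.drop_eq_nil_of_le (by omega)
    rw [show pvALoop lines out i c = (out, c) by rw [pvALoop]; simp [h]]
    simp [this, pvBFinish]
  termination_by lines.length - i
  decreasing_by
  · have := pvFindEnd_ge lines (i + 1); omega
  · omega
  · omega

-- ===== VERDICT (by name: the statement is the Claim_ definition above) =====
theorem strip_old_backfills_spec : Claim_equal_strip_old_backfills := by
  intro lines _
  unfold Spec_strip_old_backfills strip_old_backfills strip_old_backfills_alt
  simpa using pvMain lines 0 [] false
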